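-- pv_equiv track=rewrite | github.com/subway-jack/Tool-Genesis | scripts/build_benchmark/1.1a_filter_calls.py | _normalize_function_name
-- ===== SOURCE A (Python) =====
-- from typing import Any, Dict, List, Tuple
--
-- def _normalize_function_name(fn: Any) -> str:
--     if isinstance(fn, str):
--         s = fn.strip()
--         if not s:
--             return s
--         if "-" in s:
--             parts = [p for p in s.split("-") if p]
--             if parts:
--                 return parts[-1]
--         return s
--     return ""
-- ===== SOURCE B (Python) =====
-- def _normalize_function_name(fn):
--     if not isinstance(fn, str):
--         return ""
--     s = fn.strip()
--     out = []
--     for c in reversed(s):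
--         if c == '-':
--             if out:
--                 break
--         else:
--             out.append(c)
--     if not out:
--         return s
--     return ''.join(reversed(out))
-- ===== Notes on version B (the rewrite author's own statement) =====
-- stated objective: alternative
-- what changed: Instead of splitting the string on '-', filtering empty pieces into a list and indexing its last element, B does one right-to-left character scan with an accumulator and an early break: it skips trailing dashes, collects characters until it meets a dash after having collected something, and falls back to the stripped string when nothing was collected.
import Mathlib
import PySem

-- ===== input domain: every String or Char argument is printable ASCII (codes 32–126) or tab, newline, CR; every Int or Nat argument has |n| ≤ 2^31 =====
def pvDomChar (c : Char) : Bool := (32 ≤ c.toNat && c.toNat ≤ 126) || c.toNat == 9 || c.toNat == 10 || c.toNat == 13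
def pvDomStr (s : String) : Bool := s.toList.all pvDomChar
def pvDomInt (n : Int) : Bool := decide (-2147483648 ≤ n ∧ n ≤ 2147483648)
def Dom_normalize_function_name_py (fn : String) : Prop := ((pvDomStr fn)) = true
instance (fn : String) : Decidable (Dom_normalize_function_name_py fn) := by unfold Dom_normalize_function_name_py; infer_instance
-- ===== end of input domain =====

-- B replaces A's split-on-dash / filter-empties / take-last pipeline by a single
-- right-to-left character scan with an accumulator and an early break; objective: alternative.
-- ===== PORT A =====
-- Port of A. The isinstance(fn, str) branch always holds for fn : String, so the
-- final `return ""` for non-str input is unreachable and not ported.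
def normalize_function_name_py (fn : String) : String :=
  let s := PySem.Str.strip fn
  if s = "" then s
  else if PySem.Str.isIn "-" s then
    let parts := ((PySem.Str.split? s "-").getD []).filter (fun p => p ≠ "")
    if h : parts ≠ [] then parts.getLast h else s
  else s

-- ===== PORT B =====
-- Port of B: the `for c in reversed(s)` loop with its accumulator `out` becomes the
-- structural recursion nfnLoop over s.toList.reverse; `out.append(c)` is `out ++ [c]`
-- (same list, same order) and `break` is returning `out`; ''.join(reversed(out)) is
-- String.ofList out.reverse. Each step is exact.
def nfnLoop : List Char → List Char → List Char
  | [], out => out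
  | c :: rest, out =>
    if c = '-' then (if out = [] then nfnLoop rest out else out)
    else nfnLoop rest (out ++ [c])

def normalize_function_name_py_alt (fn : String) : String :=
  let s := PySem.Str.strip fn
  let out := nfnLoop s.toList.reverse []
  if out = [] then s else String.ofList out.reverse

-- ===== PRECONDITION & SPEC =====
def Spec_normalize_function_name_py (fn : String) (out : String) : Prop := out = normalize_function_name_py_alt fn
instance (fn : String) (out : String) : Decidable (Spec_normalize_function_name_py fn out) := by unfold Spec_normalize_function_name_py; infer_instance

-- ===== CLAIM (what is proved, stated in full; the proofs are below) =====
def Claim_equal_normalize_function_name_py : Prop := ∀ (fn : String), Dom_normalize_function_name_py fn → Spec_normalize_function_name_py fn (normalize_function_name_py fn)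

-- ===== LEMMAS AND PROOFS =====

-- Characterisation of B's loop.
theorem nfnLoop_ne (r : List Char) : ∀ (out : List Char), out ≠ [] →
    nfnLoop r out = out ++ r.takeWhile (fun c => c ≠ '-') := by
  induction r with
  | nil => intro out _; simp [nfnLoop]
  | cons c rest ih =>
    intro out h
    simp only [nfnLoop]
    by_cases hc : c = '-'
    · subst hc; simp [h, List.takeWhile_cons]
    · rw [if_neg hc, ih (out ++ [c]) (by simp)]
      simp [List.takeWhile_cons, hc]

theorem nfnLoop_nil : ∀ (r : List Char),
    nfnLoop r [] = (r.dropWhile (fun c => c = '-')).takeWhile (fun c => c ≠ '-')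
  | [] => by simp [nfnLoop]
  | c :: rest => by
    simp only [nfnLoop]
    by_cases hc : c = '-'
    · subst hc; simp [nfnLoop_nil rest, List.dropWhile_cons]
    · rw [if_neg hc, List.nil_append, nfnLoop_ne rest [c] (by simp)]
      simp [List.dropWhile_cons, hc, List.takeWhile_cons]

-- Characterisation of A's split/filter/last pipeline, via the dash-segments of the list.
def segsD : List Char → List (List Char)
  | [] => [[]]
  | c :: rest => if c = '-' then [] :: segsD rest else (segsD rest).modifyHead (c :: ·)

theorem segsD_ne_nil : ∀ (l : List Char), segsD l ≠ []
  | [] => by simp [segsD]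
  | c :: rest => by
    simp only [segsD]
    split_ifs
    · simp
    · have h := segsD_ne_nil rest
      cases hs : segsD rest with
      | nil => exact absurd hs h
      | cons a t => simp [List.modifyHead]

theorem go_cons (n : Nat) (c : Char) (rest cur : List Char) (acc : List (List Char)) :
    PySem.Chars.splitOn.go ['-'] (n+1) (c :: rest) cur acc
      = if c = '-' then PySem.Chars.splitOn.go ['-'] n rest [] (cur.reverse :: acc)
        else PySem.Chars.splitOn.go ['-'] n rest (c :: cur) acc := by
  rw [PySem.Chars.splitOn.go]
  by_cases h : c = '-' <;> simp [h, List.isPrefixOf]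
  intro h'; exact absurd h'.symm h

theorem go_nil (n : Nat) (cur : List Char) (acc : List (List Char)) :
    PySem.Chars.splitOn.go ['-'] (n+1) [] cur acc = (cur.reverse :: acc).reverse := by
  rw [PySem.Chars.splitOn.go]; simp

theorem splitOn_go_eq_segsD (fuel : Nat) : ∀ (l cur : List Char) (acc : List (List Char)),
    l.length ≤ fuel →
    PySem.Chars.splitOn.go ['-'] fuel l cur acc
      = acc.reverse ++ (segsD l).modifyHead (cur.reverse ++ ·) := by
  induction fuel with
  | zero =>
    intro l cur acc h
    have hl : l = [] := List.eq_nil_of_length_eq_zero (Nat.le_zero.mp h)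
    subst hl
    rw [PySem.Chars.splitOn.go]
    simp [segsD, List.modifyHead]
  | succ n ih =>
    intro l cur acc h
    cases l with
    | nil => rw [go_nil]; simp [segsD, List.modifyHead]
    | cons c rest =>
      rw [go_cons]
      by_cases hc : c = '-'
      · subst hc
        rw [if_pos rfl, ih rest [] _ (by simpa using h)]
        cases hs : segsD rest with
        | nil => exact absurd hs (segsD_ne_nil rest)
        | cons a t => simp [segsD, hs, List.modifyHead]
      · rw [if_neg hc, ih rest (c :: cur) acc (by simpa using h)]
        simp only [segsD, if_neg hc]
        cases hs : segsD rest with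
        | nil => exact absurd hs (segsD_ne_nil rest)
        | cons a t => simp [List.modifyHead]

theorem splitOn_eq_segsD (cs : List Char) : PySem.Chars.splitOn cs ['-'] = segsD cs := by
  rw [PySem.Chars.splitOn, splitOn_go_eq_segsD (cs.length + 1) cs [] [] (by omega)]
  cases hs : segsD cs with
  | nil => exact absurd hs (segsD_ne_nil cs)
  | cons a t => simp [List.modifyHead]

theorem segsD_concat_dash : ∀ (l : List Char), segsD (l ++ ['-']) = segsD l ++ [[]]
  | [] => by simp [segsD]
  | c :: rest => by
    simp only [List.cons_append, segsD, segsD_concat_dash rest]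
    split_ifs
    · rfl
    · cases hs : segsD rest with
      | nil => exact absurd hs (segsD_ne_nil rest)
      | cons a t => simp [List.modifyHead]

theorem segsD_concat_of_ne : ∀ (l : List Char) (c : Char), c ≠ '-' →
    segsD (l ++ [c]) = (segsD l).dropLast ++ [((segsD l).getLastD []) ++ [c]]
  | [], c, hc => by simp [segsD, hc, List.modifyHead]
  | d :: rest, c, hc => by
    simp only [List.cons_append, segsD, segsD_concat_of_ne rest c hc]
    by_cases hd : d = '-'
    · simp only [if_pos hd]
      cases hs : segsD rest with
      | nil => exact absurd hs (segsD_ne_nil rest)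
      | cons a t =>
        cases t with
        | nil => simp [hs]
        | cons b t' => simp [hs]
    · simp only [if_neg hd]
      cases hs : segsD rest with
      | nil => exact absurd hs (segsD_ne_nil rest)
      | cons a t =>
        cases t with
        | nil => simp [hs, List.modifyHead]
        | cons b t' => simp [hs, List.modifyHead]

theorem getLastD_segsD (l : List Char) :
    (segsD l).getLastD [] = List.rtakeWhile (fun c => c ≠ '-') l := by
  induction l using List.reverseRecOn with
  | nil => simp [segsD, List.rtakeWhile]
  | append_singleton l c ih =>
    by_cases hc : c = '-'
    · subst hc
      rw [segsD_concat_dash l]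
      simp [List.rtakeWhile_concat_neg]
    · rw [segsD_concat_of_ne l c hc]
      rw [List.rtakeWhile_concat_pos _ _ _ (by simpa using hc)]
      simp only [List.getLastD_eq_getLast?] at ih ⊢
      simp [ih]

theorem main_lemma (l : List Char) :
    ((segsD l).filter (fun p => p ≠ [])).getLast?
      = (if List.rdropWhile (fun c => c = '-') l = [] then none
         else some (List.rtakeWhile (fun c => c ≠ '-') (List.rdropWhile (fun c => c = '-') l))) := by
  induction l using List.reverseRecOn with
  | nil => simp [segsD]
  | append_singleton l c ih =>
    by_cases hc : c = '-'
    · subst hc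
      rw [segsD_concat_dash l, List.rdropWhile_concat_pos _ _ _ (by simp)]
      simpa using ih
    · rw [segsD_concat_of_ne l c hc, List.rdropWhile_concat_neg _ _ _ (by simpa using hc)]
      rw [List.rtakeWhile_concat_pos _ _ _ (by simpa using hc)]
      have h2 := getLastD_segsD l
      simp only [List.getLastD_eq_getLast?] at h2
      simp [List.filter_append, h2]

theorem segsD_of_not_mem : ∀ (l : List Char), '-' ∉ l → segsD l = [l]
  | [], _ => by simp [segsD]
  | c :: rest, h => by
    have hc : c ≠ '-' := fun e => h (e ▸ List.mem_cons_self ..)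
    simp only [segsD, if_neg hc, segsD_of_not_mem rest (fun m => h (List.mem_cons_of_mem _ m))]
    simp [List.modifyHead]

theorem filter_ne_empty_map_ofList (L : List (List Char)) :
    (L.map String.ofList).filter (fun p => p ≠ "") = (L.filter (fun p => p ≠ [])).map String.ofList := by
  induction L with
  | nil => rfl
  | cons x L ih =>
    simp only [ne_eq, decide_not] at ih
    by_cases hx : x = []
    · subst hx
      simp only [List.map_cons, List.filter_cons]
      have : (String.ofList [] : String) = "" := rfl
      simp [this, ih]
    · simp only [List.map_cons, List.filter_cons]
      have hne : String.ofList x ≠ "" := by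
        intro h
        exact hx (by simpa [String.toList_ofList] using congrArg String.toList h)
      simp [hne, hx, ih]

-- Translate B's loop result into the rdropWhile/rtakeWhile vocabulary of main_lemma.
theorem alt_loop_eq (l : List Char) :
    nfnLoop l.reverse []
      = (List.rtakeWhile (fun c => c ≠ '-') (List.rdropWhile (fun c => c = '-') l)).reverse := by
  rw [nfnLoop_nil, List.rtakeWhile, List.rdropWhile]
  simp

theorem alt_loop_nil_iff (l : List Char) :
    nfnLoop l.reverse [] = [] ↔ List.rdropWhile (fun c => c = '-') l = [] := by
  rw [nfnLoop_nil, List.rdropWhile]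
  constructor
  · intro h
    cases hd : l.reverse.dropWhile (fun c => c = '-') with
    | nil => simp [hd]
    | cons c t =>
      exfalso
      have hc : ¬ ((fun c => decide (c = '-')) c = true) := by
        have := List.head_dropWhile_not (fun c => decide (c = '-')) (l := l.reverse) (by simp [hd])
        simpa [hd] using this
      rw [hd, List.takeWhile_cons] at h
      simp at hc
      simp [hc] at h
  · intro h
    rw [show l.reverse.dropWhile (fun c => c = '-') = [] by simpa using congrArg List.reverse h]
    simp

theorem ports_eq (fn : String) :
    normalize_function_name_py fn = normalize_function_name_py_alt fn := by
  unfold normalize_function_name_py normalize_function_name_py_alt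
  set s := PySem.Str.strip fn with hsdef
  by_cases hs : s = ""
  · simp [hs, nfnLoop]
  simp only [if_neg hs]
  have hcs : s.toList ≠ [] := fun h => hs (String.toList_eq_nil_iff.mp h)
  have hsplit : ((PySem.Str.split? s "-").getD []).filter (fun p => p ≠ "")
      = ((segsD s.toList).filter (fun p => p ≠ [])).map String.ofList := by
    rw [PySem.Str.split?]
    have h1 : ("-" : String).toList = ['-'] := rfl
    rw [h1, PySem.Chars.split?]
    simp only [List.isEmpty_cons, Bool.false_eq_true, if_false, Option.map_some,
      Option.getD_some, splitOn_eq_segsD]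
    exact filter_ne_empty_map_ofList _
  have hmain := main_lemma s.toList
  have hloop := alt_loop_eq s.toList
  have hloopnil := alt_loop_nil_iff s.toList
  by_cases hin : PySem.Str.isIn "-" s = true
  · rw [if_pos hin, hsplit]
    cases hPL : (segsD s.toList).filter (fun p => p ≠ []) with
    | nil =>
      rw [hPL] at hmain
      simp only [List.getLast?_nil] at hmain
      by_cases ht : List.rdropWhile (fun c => c = '-') s.toList = []
      · rw [if_pos (hloopnil.mpr ht)]
        simp
      · rw [if_neg ht] at hmain
        exact absurd hmain.symm (by simp)
    | cons a tl =>
      rw [hPL] at hmain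
      by_cases ht : List.rdropWhile (fun c => c = '-') s.toList = []
      · rw [if_pos ht] at hmain
        exact absurd hmain (by simp)
      · rw [if_neg ht] at hmain
        rw [if_neg (fun h => ht (hloopnil.mp h))]
        have hne : (a :: tl).map String.ofList ≠ [] := by simp
        rw [dif_pos hne, List.getLast_map]
        have hlast : (a :: tl).getLast (by simp)
            = List.rtakeWhile (fun c => c ≠ '-') (List.rdropWhile (fun c => c = '-') s.toList) := by
          rw [List.getLast?_eq_some_getLast (l := a :: tl) (by simp)] at hmain
          exact Option.some.inj hmain
        rw [hlast, hloop]
        simp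
  · rw [if_neg hin]
    have hnotmem : '-' ∉ s.toList := by
      intro hm
      apply hin
      rw [PySem.Str.isIn_eq]
      have h1 : ("-" : String).toList = ['-'] := rfl
      rw [h1, PySem.Chars.isIn_iff_infix]
      exact (List.singleton_infix_iff '-' s.toList).mpr hm
    rw [segsD_of_not_mem _ hnotmem] at hmain
    rw [List.filter_cons_of_pos (by simpa using hcs), List.filter_nil] at hmain
    simp only [List.getLast?_singleton] at hmain
    by_cases ht : List.rdropWhile (fun c => c = '-') s.toList = []
    · rw [if_pos ht] at hmain
      exact absurd hmain (by simp)
    · rw [if_neg ht] at hmain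
      rw [if_neg (fun h => ht (hloopnil.mp h)), hloop]
      simp only [List.reverse_reverse]
      rw [← Option.some.inj hmain, String.ofList_toList]

-- ===== VERDICT (by name: the statement is the Claim_ definition above) =====
theorem normalize_function_name_py_spec : Claim_equal_normalize_function_name_py := by
  intro fn _
  unfold Spec_normalize_function_name_py
  exact ports_eq fn
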